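-- pv_equiv track=rewrite | github.com/dudekroma/KG2025 | LR3/main.py | castle_pitway_line
-- ===== SOURCE A (Python) =====
-- def castle_pitway_line(x1, y1, x2, y2):
--     points = []
--
--     a = abs(x2 - x1)
--     b = abs(y2 - y1)
--
--     # Определяем направления
--     sx = 1 if x2 >= x1 else -1
--     sy = 1 if y2 >= y1 else -1
--
--     y_val = b
--     x_val = a - b
--
--     m1 = "s"  # горизонтальный шаг
--     m2 = "d"  # диагональный шаг
--
--     # Алгоритм Евклида для строк
--     while x_val != y_val:
--         if x_val > y_val:
--             x_val = x_val - y_val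
--             m2 = m1 + m2  # конкатенация строк
--         else:
--             y_val = y_val - x_val
--             m1 = m2 + m1  # конкатенация строк
--
--     # Финальная последовательность
--     sequence = m2 + m1
--
--     x, y = 0, 0
--     points.append((x1, y1))
--
--     for move in sequence:
--         if move == 's':
--             # Горизонтальный шаг
--             x += sx
--         elif move == 'd':
--             # Диагональный шаг
--             x += sx
--             y += sy
--
--         points.append((x1 + x, y1 + y))
--
--     return points
-- ===== SOURCE B (Python) =====
-- def castle_pitway_line(x1, y1, x2, y2):
--     a = abs(x2 - x1)
--     b = abs(y2 - y1)
--     if a == 0 and b == 0: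
--         return [(x1, y1)]
--     sx = 1 if x2 >= x1 else -1
--     sy = 1 if y2 >= y1 else -1
--     # closed form: the Euclid word walked from (x1, y1) visits exactly the
--     # mechanical-line points ( x1 + sx*i , y1 + sy*floor((i+1)*b/a) ),
--     # and it stops after a // gcd(a, b) moves.
--     g, r = a, b
--     while r:
--         g, r = r, g % r
--     n = a // g
--     return [(x1 + sx * i, y1 + sy * ((i + 1) * b // a)) for i in range(n + 1)]
-- ===== Notes on version B (the rewrite author's own statement) =====
-- stated objective: alternative
-- what changed: Replaced the subtractive string-Euclid word construction plus move-walking loop by a closed form: after a division-based gcd, every point is emitted directly as (x1+sx*i, y1+sy*((i+1)*b//a)) for i in range(a//gcd(a,b)+1), with no move string built at all.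
-- intended difference: On the degenerate call with x1 = x2 and y1 = y2 A returns three points [(x1,y1),(x1+1,y1+1),(x1+2,y1+1)] because its leftover 'ds' seed sequence is still walked, while B returns the intended single-point rasterization [(x1,y1)]. — e.g. on castle_pitway_line(0, 0, 0, 0): A returns [(0, 0), (1, 1), (2, 1)], B returns [(0, 0)]
import Mathlib
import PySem

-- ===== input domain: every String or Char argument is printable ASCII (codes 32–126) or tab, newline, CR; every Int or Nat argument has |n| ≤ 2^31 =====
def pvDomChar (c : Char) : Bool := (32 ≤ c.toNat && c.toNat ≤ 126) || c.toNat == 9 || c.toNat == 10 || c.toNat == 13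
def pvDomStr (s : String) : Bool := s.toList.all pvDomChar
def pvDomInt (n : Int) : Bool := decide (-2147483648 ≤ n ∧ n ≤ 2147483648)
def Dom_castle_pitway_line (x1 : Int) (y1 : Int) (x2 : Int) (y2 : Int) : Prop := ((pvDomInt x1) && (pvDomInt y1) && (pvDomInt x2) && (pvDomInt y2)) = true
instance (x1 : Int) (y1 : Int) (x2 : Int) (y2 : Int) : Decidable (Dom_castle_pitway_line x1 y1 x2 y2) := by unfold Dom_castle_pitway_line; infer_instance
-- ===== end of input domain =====

-- B replaces A's subtractive string-Euclid word construction and move-walking loop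
-- by a closed form (objective: alternative): after a division-based gcd it emits
-- each point directly as (x1+sx*i, y1+sy*((i+1)*b//a)); on the degenerate
-- single-point call B returns just [(x1, y1)].

-- ===== PORT A =====
-- A's while loop, with fuel for totality only: inside Pre_ the fuel never runs out.
def aLoop : Nat → Int → Int → List Char → List Char → List Char × List Char
  | 0, _, _, m1, m2 => (m1, m2)
  | f + 1, x, y, m1, m2 =>
    if x = y then (m1, m2)
    else if x > y then aLoop f (x - y) y m1 (m1 ++ m2)
    else aLoop f x (y - x) (m2 ++ m1) m2

def castle_pitway_line (x1 : Int) (y1 : Int) (x2 : Int) (y2 : Int) : List (Int × Int) :=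
  let a := |x2 - x1|
  let b := |y2 - y1|
  let sx : Int := if x2 ≥ x1 then 1 else -1
  let sy : Int := if y2 ≥ y1 then 1 else -1
  let m := aLoop (a.toNat + 1) (a - b) b ['s'] ['d']
  let seq := m.2 ++ m.1
  (seq.foldl (fun st c =>
      if c = 's' then (st.1 + sx, st.2.1, st.2.2 ++ [(x1 + (st.1 + sx), y1 + st.2.1)])
      else if c = 'd' then
        (st.1 + sx, st.2.1 + sy, st.2.2 ++ [(x1 + (st.1 + sx), y1 + (st.2.1 + sy))])
      else (st.1, st.2.1, st.2.2 ++ [(x1 + st.1, y1 + st.2.1)]))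
    ((0 : Int), (0 : Int), [(x1, y1)])).2.2

-- ===== PORT B =====
-- B's gcd while loop (g, r = r, g % r), with fuel for totality only.
def bGcd : Nat → Int → Int → Int
  | 0, g, _ => g
  | f + 1, g, r => if r = 0 then g else bGcd f r (PySem.Int.mod g r)

def castle_pitway_line_alt (x1 : Int) (y1 : Int) (x2 : Int) (y2 : Int) : List (Int × Int) :=
  let a := |x2 - x1|
  let b := |y2 - y1|
  if a = 0 ∧ b = 0 then [(x1, y1)]
  else
    let sx : Int := if x2 ≥ x1 then 1 else -1
    let sy : Int := if y2 ≥ y1 then 1 else -1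
    let g := bGcd (b.toNat + 1) a b
    let n := PySem.Int.floordiv a g
    (PySem.List.pyRange 0 (n + 1) 1).map
      (fun i => (x1 + sx * i, y1 + sy * PySem.Int.floordiv ((i + 1) * b) a))

-- ===== PRECONDITION & SPEC =====
-- Pre_ excludes exactly the inputs on which A's subtractive loop never terminates
-- (Python A diverges whenever not 0 < |y2-y1| < |x2-x1|, except the equal-point call).
def Pre_castle_pitway_line (x1 : Int) (y1 : Int) (x2 : Int) (y2 : Int) : Prop :=
  (0 < |y2 - y1| ∧ |y2 - y1| < |x2 - x1|) ∨ (x1 = x2 ∧ y1 = y2)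
instance (x1 : Int) (y1 : Int) (x2 : Int) (y2 : Int) : Decidable (Pre_castle_pitway_line x1 y1 x2 y2) := by unfold Pre_castle_pitway_line; infer_instance

def pvWitness_castle_pitway_line : Int × Int × Int × Int := (0, 0, 5, 2)

-- On the degenerate call with x1 = x2 and y1 = y2 A returns three points
-- [(x1,y1),(x1+1,y1+1),(x1+2,y1+1)] because its leftover "ds" seed sequence is still
-- walked, while B returns the intended single-point rasterization [(x1,y1)].
def D_castle_pitway_line (x1 : Int) (y1 : Int) (x2 : Int) (y2 : Int) : Prop :=
  x1 = x2 ∧ y1 = y2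
instance (x1 : Int) (y1 : Int) (x2 : Int) (y2 : Int) : Decidable (D_castle_pitway_line x1 y1 x2 y2) := by unfold D_castle_pitway_line; infer_instance

def Spec_castle_pitway_line (x1 : Int) (y1 : Int) (x2 : Int) (y2 : Int) (out : List (Int × Int)) : Prop :=
  ¬ D_castle_pitway_line x1 y1 x2 y2 → out = castle_pitway_line_alt x1 y1 x2 y2
instance (x1 : Int) (y1 : Int) (x2 : Int) (y2 : Int) (out : List (Int × Int)) : Decidable (Spec_castle_pitway_line x1 y1 x2 y2 out) := by unfold Spec_castle_pitway_line; infer_instance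

def pvDiffWitness_castle_pitway_line : Int × Int × Int × Int := (0, 0, 0, 0)
def pvDiffWitnessOut_castle_pitway_line : (List (Int × Int)) × (List (Int × Int)) :=
  ([(0, 0), (1, 1), (2, 1)], [(0, 0)])

-- ===== CLAIM (what is proved, stated in full; the proofs are below) =====
def Claim_unchanged_castle_pitway_line : Prop := ∀ (x1 : Int) (y1 : Int) (x2 : Int) (y2 : Int), Dom_castle_pitway_line x1 y1 x2 y2 → Pre_castle_pitway_line x1 y1 x2 y2 → Spec_castle_pitway_line x1 y1 x2 y2 (castle_pitway_line x1 y1 x2 y2)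
def Claim_changed_castle_pitway_line : Prop := Dom_castle_pitway_line (pvDiffWitness_castle_pitway_line.1) (pvDiffWitness_castle_pitway_line.2.1) (pvDiffWitness_castle_pitway_line.2.2.1) (pvDiffWitness_castle_pitway_line.2.2.2) ∧ Pre_castle_pitway_line (pvDiffWitness_castle_pitway_line.1) (pvDiffWitness_castle_pitway_line.2.1) (pvDiffWitness_castle_pitway_line.2.2.1) (pvDiffWitness_castle_pitway_line.2.2.2) ∧ D_castle_pitway_line (pvDiffWitness_castle_pitway_line.1) (pvDiffWitness_castle_pitway_line.2.1) (pvDiffWitness_castle_pitway_line.2.2.1) (pvDiffWitness_castle_pitway_line.2.2.2) ∧ castle_pitway_line (pvDiffWitness_castle_pitway_line.1) (pvDiffWitness_castle_pitway_line.2.1) (pvDiffWitness_castle_pitway_line.2.2.1) (pvDiffWitness_castle_pitway_line.2.2.2) = pvDiffWitnessOut_castle_pitway_line.1 ∧ castle_pitway_line_alt (pvDiffWitness_castle_pitway_line.1) (pvDiffWitness_castle_pitway_line.2.1) (pvDiffWitness_castle_pitway_line.2.2.1) (pvDiffWitness_castle_pitway_line.2.2.2) = pvDiffWitnessOut_castle_pitway_line.2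 ∧ pvDiffWitnessOut_castle_pitway_line.1 ≠ pvDiffWitnessOut_castle_pitway_line.2
def Claim_exact_castle_pitway_line : Prop := ∀ (x1 : Int) (y1 : Int) (x2 : Int) (y2 : Int), Dom_castle_pitway_line x1 y1 x2 y2 → Pre_castle_pitway_line x1 y1 x2 y2 → D_castle_pitway_line x1 y1 x2 y2 → castle_pitway_line x1 y1 x2 y2 ≠ castle_pitway_line_alt x1 y1 x2 y2

-- ===== LEMMAS AND PROOFS =====

-- rotation-walk ("mechanical word") semantics: runW a b w r = some r' iff the word w
-- is exactly the letters the rotation r ↦ r + b (mod a) emits starting at r, ending at r'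
def runW (a b : Int) : List Char → Int → Option Int
  | [], r => some r
  | c :: w, r =>
    if a ≤ r + b then (if c = 'd' then runW a b w (r + b - a) else none)
    else (if c = 's' then runW a b w (r + b) else none)

lemma runW_append (a b : Int) :
    ∀ (u v : List Char) (r : Int),
      runW a b (u ++ v) r = (runW a b u r).bind (runW a b v) := by
  intro u
  induction u with
  | nil => intro v r; simp [runW]
  | cons c u ih =>
    intro v r
    simp only [List.cons_append, runW]
    split_ifs <;> simp [ih]

-- the loop invariant: m1 is the mechanical word on [b-y, b+x-y) shifting by +y,
-- m2 the one on [b+x-y, b+x) shifting by -x; a = x·|m1| + y·|m2|; at termination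
-- x = y = gcd and the final word m2 ++ m1 walks the rotation from b back to b.
lemma aLoop_inv (a b : Int) (_hb : 0 < b) (_hba : b < a) :
    ∀ (f : Nat) (x y : Int) (m1 m2 : List Char),
      1 ≤ x → 1 ≤ y → y ≤ b → x + b ≤ a → (x + y).toNat ≤ f →
      a = x * m1.length + y * m2.length →
      (∀ r, b - y ≤ r → r < b + x - y → runW a b m1 r = some (r + y)) →
      (∀ r, b + x - y ≤ r → r < b + x → runW a b m2 r = some (r - x)) →
      a = (Int.gcd x y : Int) *
            (((aLoop f x y m1 m2).1.length : Int) + ((aLoop f x y m1 m2).2.length : Int)) ∧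
      runW a b ((aLoop f x y m1 m2).2 ++ (aLoop f x y m1 m2).1) b = some b := by
  intro f
  induction f with
  | zero => intro x y m1 m2 hx hy _ _ hf _ _ _; omega
  | succ f ih =>
    intro x y m1 m2 hx hy hyb hxa hf hlen h1 h2
    by_cases hxy : x = y
    · subst hxy
      rw [aLoop, if_pos rfl]
      constructor
      · rw [Int.gcd_self]
        have hn : ((x.natAbs : Int)) = x := Int.natAbs_of_nonneg (by omega)
        rw [hn]
        push_cast at hlen ⊢
        linarith
      · rw [runW_append, h2 b (by omega) (by omega)]
        have := h1 (b - x) (by omega) (by omega)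
        simpa using this
    · rw [aLoop, if_neg hxy]
      by_cases hgt : x > y
      · rw [if_pos hgt]
        have hgcd : Int.gcd (x - y) y = Int.gcd x y := by
          rw [Int.gcd_comm (x - y) y, Int.gcd_comm x y]
          exact Int.gcd_sub_self_right y x
        have h2' : ∀ r, b + (x - y) - y ≤ r → r < b + (x - y) →
            runW a b (m1 ++ m2) r = some (r - (x - y)) := by
          intro r hr1 hr2
          rw [runW_append, h1 r (by omega) (by omega)]
          have := h2 (r + y) (by omega) (by omega)
          rw [Option.bind_some] at *
          rw [this]
          congr 1
          ring
        have := ih (x - y) y m1 (m1 ++ m2) (by omega) hy hyb (by omega) (by omega)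
          (by rw [List.length_append]; push_cast at hlen ⊢; ring_nf at hlen ⊢; linarith)
          (fun r hr1 hr2 => h1 r hr1 (by omega)) h2'
        rw [hgcd] at this
        exact this
      · rw [if_neg hgt]
        have hlt : x < y := by omega
        have hgcd : Int.gcd x (y - x) = Int.gcd x y := Int.gcd_sub_self_right x y
        have h1' : ∀ r, b - (y - x) ≤ r → r < b + x - (y - x) →
            runW a b (m2 ++ m1) r = some (r + (y - x)) := by
          intro r hr1 hr2
          rw [runW_append, h2 r (by omega) (by omega)]
          have := h1 (r - x) (by omega) (by omega)
          rw [Option.bind_some] at *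
          rw [this]
          congr 1
          ring
        have := ih x (y - x) (m2 ++ m1) m2 hx (by omega) (by omega) hxa (by omega)
          (by rw [List.length_append]; push_cast at hlen ⊢; ring_nf at hlen ⊢; linarith)
          h1' (fun r hr1 hr2 => h2 r (by omega) hr2)
        rw [hgcd] at this
        exact this

-- B's division gcd loop computes Int.gcd (for a positive start and nonnegative second arg)
lemma bGcd_eq_gcd :
    ∀ (f : Nat) (g r : Int), 0 < g → 0 ≤ r → r.toNat < f →
      bGcd f g r = (Int.gcd g r : Int) := by
  intro f
  induction f with
  | zero => intro g r _ _ hf; omega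
  | succ f ih =>
    intro g r hg hr hf
    rw [bGcd]
    by_cases h0 : r = 0
    · subst h0
      simp [Int.natAbs_of_nonneg (le_of_lt hg)]
    · rw [if_neg h0]
      have hrpos : 0 < r := by omega
      have hm : PySem.Int.mod g r = g % r := PySem.Int.mod_eq_emod_of_pos hrpos
      have hmlt : g % r < r := Int.emod_lt_of_pos g hrpos
      have hmnn : 0 ≤ g % r := Int.emod_nonneg g (by omega)
      rw [hm, ih r (g % r) hrpos hmnn (by omega)]
      congr 1
      rw [Int.gcd_comm g r]
      rw [Int.gcd_comm r (g % r), Int.gcd_emod g r]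
      exact Int.gcd_comm g r

-- walking a valid mechanical word emits exactly the closed-form points
lemma emit (a b x1 y1 sx sy : Int) (ha : 0 < a) (hba : b < a) (hb0 : 0 ≤ b) :
    ∀ (w : List Char) (j dy r : Int) (pts : List (Int × Int)),
      0 ≤ r → r < a → (j + 1) * b = dy * a + r → (runW a b w r).isSome →
      (w.foldl (fun st c =>
          if c = 's' then (st.1 + sx, st.2.1, st.2.2 ++ [(x1 + (st.1 + sx), y1 + st.2.1)])
          else if c = 'd' then
            (st.1 + sx, st.2.1 + sy, st.2.2 ++ [(x1 + (st.1 + sx), y1 + (st.2.1 + sy))])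
          else (st.1, st.2.1, st.2.2 ++ [(x1 + st.1, y1 + st.2.1)]))
        (sx * j, sy * dy, pts)).2.2
      = pts ++ (List.range w.length).map
          (fun t : Nat => (x1 + sx * (j + (t : Int) + 1), y1 + sy * (((j + (t : Int) + 2) * b) / a))) := by
  intro w
  induction w with
  | nil => intro j dy r pts _ _ _ _; simp
  | cons c w ihw =>
    intro j dy r pts hr0 hra hjb hrun
    rw [runW] at hrun
    by_cases hd : a ≤ r + b
    · -- diagonal step: letter must be 'd'
      rw [if_pos hd] at hrun
      by_cases hc : c = 'd'
      · subst hc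
        rw [if_pos rfl] at hrun
        simp only [List.foldl_cons, Char.reduceEq, reduceIte]
        rw [show sx * j + sx = sx * (j + 1) by ring, show sy * dy + sy = sy * (dy + 1) by ring]
        have hjb' : (j + 1 + 1) * b = (dy + 1) * a + (r + b - a) := by ring_nf; ring_nf at hjb; linarith
        rw [ihw (j + 1) (dy + 1) (r + b - a) _ (by omega) (by omega) hjb' hrun]
        have hdy1 : dy + 1 = (j + 2) * b / a := by
          have h : (j + 2) * b = (r + b - a) + (dy + 1) * a := by linarith
          rw [h, Int.add_mul_ediv_right _ _ (by omega : a ≠ 0),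
            Int.ediv_eq_zero_of_lt (by omega) (by omega)]
          ring
        rw [List.length_cons, List.range_succ_eq_map, List.map_cons, List.map_map,
          List.append_assoc, List.singleton_append]
        congr 1
        congr 1
        · rw [hdy1]
          push_cast
          norm_num
        · apply List.map_congr_left
          intro t _
          simp only [Function.comp_apply]
          push_cast
          congr 3 <;> ring
      · rw [if_neg hc] at hrun; simp at hrun
    · -- straight step: letter must be 's'
      rw [if_neg hd] at hrun
      by_cases hc : c = 's'
      · subst hc
        rw [if_pos rfl] at hrun
        simp only [List.foldl_cons, reduceIte]
        rw [show sx * j + sx = sx * (j + 1) by ring]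
        have hjb' : (j + 1 + 1) * b = dy * a + (r + b) := by ring_nf; ring_nf at hjb; linarith
        rw [ihw (j + 1) dy (r + b) _ (by omega) (by omega) hjb' hrun]
        have hdy1 : dy = (j + 2) * b / a := by
          have h : (j + 2) * b = (r + b) + dy * a := by linarith
          rw [h, Int.add_mul_ediv_right _ _ (by omega : a ≠ 0),
            Int.ediv_eq_zero_of_lt (by omega) (by omega)]
          ring
        rw [List.length_cons, List.range_succ_eq_map, List.map_cons, List.map_map,
          List.append_assoc, List.singleton_append]
        congr 1
        congr 1
        · rw [hdy1]
          push_cast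
          norm_num
        · apply List.map_congr_left
          intro t _
          simp only [Function.comp_apply]
          push_cast
          congr 3 <;> ring
      · rw [if_neg hc] at hrun; simp at hrun

-- ===== VERDICT (by name: the statement is the Claim_ definition above) =====
theorem castle_pitway_line_spec : Claim_unchanged_castle_pitway_line := by
  intro x1 y1 x2 y2 _hdom hpre
  unfold Spec_castle_pitway_line
  intro hD
  rcases hpre with ⟨hb, hba⟩ | hdeg
  · unfold castle_pitway_line castle_pitway_line_alt
    simp only []
    set a := |x2 - x1| with ha
    set b := |y2 - y1| with hb'
    have ha0 : 0 < a := by omega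
    rw [if_neg (by omega : ¬ (a = 0 ∧ b = 0))]
    -- the loop invariant at the initial state
    have hinit := aLoop_inv a b hb hba (a.toNat + 1) (a - b) b ['s'] ['d']
      (by omega) (by omega) le_rfl (by omega) (by omega)
      (by simp)
      (by
        intro r hr1 hr2
        rw [runW, if_neg (by omega), if_pos rfl]
        rfl)
      (by
        intro r hr1 hr2
        rw [runW, if_pos (by omega), if_pos rfl]
        simp only [runW]
        congr 1
        omega)
    obtain ⟨hglen, hrun⟩ := hinit
    set m := aLoop (a.toNat + 1) (a - b) b ['s'] ['d'] with hm
    set seq := m.2 ++ m.1 with hseq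
    set G : Int := (Int.gcd (a - b) b : Int) with hG
    have hGab : Int.gcd (a - b) b = Int.gcd a b := by
      rw [Int.gcd_comm (a - b) b, Int.gcd_comm a b]
      exact Int.gcd_sub_self_right b a
    have hGpos : 0 < G := by
      rw [hG, hGab]
      have : Int.gcd a b ≠ 0 := by
        intro h
        rw [Int.gcd_eq_zero_iff] at h
        omega
      positivity
    have hlenseq : (a : Int) = G * (seq.length : Int) := by
      rw [hseq, List.length_append]
      push_cast
      linarith
    -- B's gcd and n
    have hgB : bGcd (b.toNat + 1) a b = G := by
      rw [bGcd_eq_gcd (b.toNat + 1) a b ha0 (by omega) (by omega), hG, hGab]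
    have hn : PySem.Int.floordiv a (bGcd (b.toNat + 1) a b) = (seq.length : Int) := by
      rw [hgB, PySem.Int.floordiv_eq_ediv_of_pos hGpos, hlenseq,
        Int.mul_ediv_cancel_left _ (by omega : G ≠ 0)]
    rw [hn]
    -- A's emission
    have hrun' : (runW a b seq b).isSome := by rw [hrun]; rfl
    have hstart : ((0 : Int) + 1) * b = 0 * a + b := by ring
    have hemit := emit a b x1 y1 (if x2 ≥ x1 then 1 else -1) (if y2 ≥ y1 then 1 else -1)
      ha0 hba (by omega) seq 0 0 b [(x1, y1)] (by omega) (by omega) hstart hrun'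
    simp only [mul_zero] at hemit
    rw [show ((0 : Int), (0 : Int), [(x1, y1)]) =
      ((if x2 ≥ x1 then (1 : Int) else -1) * 0, (if y2 ≥ y1 then (1 : Int) else -1) * 0,
        [(x1, y1)]) by norm_num] at *
    rw [hemit]
    -- B's list
    rw [PySem.List.pyRange_one, List.singleton_append]
    have hlen' : ((seq.length : Int) + 1 - 0).toNat = seq.length + 1 := by omega
    rw [hlen', List.range_succ_eq_map, List.map_cons, List.map_map]
    congr 1
    · -- the head point is (x1, y1)
      have hfb : PySem.Int.floordiv b a = 0 := by
        rw [PySem.Int.floordiv_eq_ediv_of_pos ha0]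
        exact Int.ediv_eq_zero_of_lt (by omega) (by omega)
      simp [hfb]
    · rw [List.map_map]
      apply List.map_congr_left
      intro t _
      simp only [Function.comp_apply, PySem.Int.floordiv_eq_ediv_of_pos ha0]
      push_cast
      congr 3
  · exact absurd hdeg hD

theorem castle_pitway_line_changed : Claim_changed_castle_pitway_line := by
  unfold Claim_changed_castle_pitway_line
  decide

theorem castle_pitway_line_tight : Claim_exact_castle_pitway_line := by
  intro x1 y1 x2 y2 _hdom _hpre hD
  obtain ⟨hx, hy⟩ := hD
  subst hx; subst hy
  simp [castle_pitway_line, castle_pitway_line_alt, aLoop]
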